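-- pv_equiv track=rewrite | github.com/wickai/fibonacci_wave_2d | claw_research/analyze_generating_sequences.py | verify_coefficients
-- ===== SOURCE A (Python) =====
-- from typing import Tuple, List, Dict, Optional
--
-- def generate_sequence(start_a: int, start_b: int, m: int, length: int = None) -> List[Tuple[int, int]]:
--     """Generate sequence modulo m."""
--     if length is None:
--         seen = {}
--         a, b = start_a % m, start_b % m
--         n = 0
--         while (a, b) not in seen:
--             seen[(a, b)] = n
--             a, b = b, (a + b) % m
--             n += 1
--         length = n
--
--     seq = []
--     a, b = start_a % m, start_b % m
--     for _ in range(length):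
--         seq.append((a, b))
--         a, b = b, (a + b) % m
--     return seq
--
-- def verify_coefficients(m: int, gen_a: int, gen_b: int, start_i: int, start_j: int,
--                         coeff_x: int, coeff_y: int, seq_length: int = 20) -> bool:
--     """Verify coefficients produce correct sequence."""
--     D = generate_sequence(1, gen_a, m, seq_length)
--     C = generate_sequence(1, gen_b, m, seq_length)
--     S = generate_sequence(start_i, start_j, m, seq_length)
--
--     for n in range(seq_length):
--         expected = S[n]
--         actual = ((coeff_x * D[n][0] + coeff_y * C[n][0]) % m,
--                   (coeff_x * D[n][1] + coeff_y * C[n][1]) % m)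
--         if expected != actual:
--             return False
--     return True
-- ===== SOURCE B (Python) =====
-- def verify_coefficients(m: int, gen_a: int, gen_b: int, start_i: int, start_j: int,
--                         coeff_x: int, coeff_y: int, seq_length: int = 20) -> bool:
--     da, db = 1 % m, gen_a % m
--     ca, cb = 1 % m, gen_b % m
--     sa, sb = start_i % m, start_j % m
--     for _ in range(seq_length):
--         if (coeff_x * da + coeff_y * ca) % m != sa or (coeff_x * db + coeff_y * cb) % m != sb:
--             return False
--         da, db = db, (da + db) % m
--         ca, cb = cb, (ca + cb) % m
--         sa, sb = sb, (sa + sb) % m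
--     return True
-- ===== Notes on version B (the rewrite author's own statement) =====
-- stated objective: faster
-- what changed: B inlines generate_sequence and fuses the three materialized length-n sequences plus the comparison pass into one loop that keeps only three (a,b) pairs, checking and advancing them in a single pass with no intermediate lists.
import Mathlib
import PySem

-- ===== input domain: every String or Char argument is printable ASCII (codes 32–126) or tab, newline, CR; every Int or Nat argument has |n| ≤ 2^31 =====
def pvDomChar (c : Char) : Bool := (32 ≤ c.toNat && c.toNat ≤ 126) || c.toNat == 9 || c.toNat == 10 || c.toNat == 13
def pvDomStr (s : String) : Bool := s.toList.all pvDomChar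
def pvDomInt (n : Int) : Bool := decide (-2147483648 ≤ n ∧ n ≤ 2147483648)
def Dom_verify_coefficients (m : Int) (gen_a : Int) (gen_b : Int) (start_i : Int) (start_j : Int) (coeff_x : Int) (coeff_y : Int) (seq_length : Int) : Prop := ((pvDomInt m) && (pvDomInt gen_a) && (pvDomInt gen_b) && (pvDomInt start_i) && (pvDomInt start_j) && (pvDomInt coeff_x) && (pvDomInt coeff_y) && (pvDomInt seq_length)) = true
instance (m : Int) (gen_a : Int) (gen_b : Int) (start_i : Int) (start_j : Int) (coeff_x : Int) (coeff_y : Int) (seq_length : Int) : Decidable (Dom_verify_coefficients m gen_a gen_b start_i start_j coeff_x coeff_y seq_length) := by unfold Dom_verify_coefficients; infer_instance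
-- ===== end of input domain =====

-- ===== PORT A =====
-- generate_sequence is only ever called with an explicit length here, so the
-- `length is None` branch of the Python helper is dead code and the port takes length : Int.
def generate_sequence (start_a : Int) (start_b : Int) (m : Int) (length : Int) : List (Int × Int) :=
  ((PySem.List.pyRange 0 length 1).foldl
    (fun (st : List (Int × Int) × Int × Int) _ =>
      (st.1 ++ [st.2], st.2.2, PySem.Int.mod (st.2.1 + st.2.2) m))
    (([] : List (Int × Int)), PySem.Int.mod start_a m, PySem.Int.mod start_b m)).1

def verify_coefficients (m : Int) (gen_a : Int) (gen_b : Int) (start_i : Int) (start_j : Int) (coeff_x : Int) (coeff_y : Int) (seq_length : Int) : Bool :=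
  let D := generate_sequence 1 gen_a m seq_length
  let C := generate_sequence 1 gen_b m seq_length
  let S := generate_sequence start_i start_j m seq_length
  (PySem.List.pyRange 0 seq_length 1).all fun n =>
    match PySem.List.pyGet? S n, PySem.List.pyGet? D n, PySem.List.pyGet? C n with
    | some e, some d, some c =>
        decide (e = (PySem.Int.mod (coeff_x * d.1 + coeff_y * c.1) m,
                     PySem.Int.mod (coeff_x * d.2 + coeff_y * c.2) m))
    | _, _, _ => false   -- IndexError; unreachable (each list has seq_length elements)

-- ===== PORT B =====
-- one fused loop over seq_length steps; state = the three current (a,b) pairs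
def vcLoop (m : Int) (coeff_x : Int) (coeff_y : Int) :
    Nat → Int × Int → Int × Int → Int × Int → Bool
  | 0, _, _, _ => true
  | k + 1, d, c, s =>
    if PySem.Int.mod (coeff_x * d.1 + coeff_y * c.1) m ≠ s.1 ∨
       PySem.Int.mod (coeff_x * d.2 + coeff_y * c.2) m ≠ s.2 then
      false
    else
      vcLoop m coeff_x coeff_y k
        (d.2, PySem.Int.mod (d.1 + d.2) m)
        (c.2, PySem.Int.mod (c.1 + c.2) m)
        (s.2, PySem.Int.mod (s.1 + s.2) m)

def verify_coefficients_alt (m : Int) (gen_a : Int) (gen_b : Int) (start_i : Int) (start_j : Int) (coeff_x : Int) (coeff_y : Int) (seq_length : Int) : Bool :=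
  vcLoop m coeff_x coeff_y seq_length.toNat
    (PySem.Int.mod 1 m, PySem.Int.mod gen_a m)
    (PySem.Int.mod 1 m, PySem.Int.mod gen_b m)
    (PySem.Int.mod start_i m, PySem.Int.mod start_j m)

-- ===== PRECONDITION & SPEC =====
-- Pre_ excludes m = 0, on which the Python (both A and B) raises ZeroDivisionError at the first `% m`.
def Pre_verify_coefficients (m : Int) (gen_a : Int) (gen_b : Int) (start_i : Int) (start_j : Int) (coeff_x : Int) (coeff_y : Int) (seq_length : Int) : Prop := m ≠ 0
instance (m : Int) (gen_a : Int) (gen_b : Int) (start_i : Int) (start_j : Int) (coeff_x : Int) (coeff_y : Int) (seq_length : Int) : Decidable (Pre_verify_coefficients m gen_a gen_b start_i start_j coeff_x coeff_y seq_length) := by unfold Pre_verify_coefficients; infer_instance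

def pvWitness_verify_coefficients : Int × Int × Int × Int × Int × Int × Int × Int := (5, 2, 3, 1, 4, 1, 1, 6)

def Spec_verify_coefficients (m : Int) (gen_a : Int) (gen_b : Int) (start_i : Int) (start_j : Int) (coeff_x : Int) (coeff_y : Int) (seq_length : Int) (out : Bool) : Prop := out = verify_coefficients_alt m gen_a gen_b start_i start_j coeff_x coeff_y seq_length
instance (m : Int) (gen_a : Int) (gen_b : Int) (start_i : Int) (start_j : Int) (coeff_x : Int) (coeff_y : Int) (seq_length : Int) (out : Bool) : Decidable (Spec_verify_coefficients m gen_a gen_b start_i start_j coeff_x coeff_y seq_length out) := by unfold Spec_verify_coefficients; infer_instance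

-- ===== CLAIM (what is proved, stated in full; the proofs are below) =====
def Claim_equal_verify_coefficients : Prop := ∀ (m : Int) (gen_a : Int) (gen_b : Int) (start_i : Int) (start_j : Int) (coeff_x : Int) (coeff_y : Int) (seq_length : Int), Dom_verify_coefficients m gen_a gen_b start_i start_j coeff_x coeff_y seq_length → Pre_verify_coefficients m gen_a gen_b start_i start_j coeff_x coeff_y seq_length → Spec_verify_coefficients m gen_a gen_b start_i start_j coeff_x coeff_y seq_length (verify_coefficients m gen_a gen_b start_i start_j coeff_x coeff_y seq_length)

-- ===== LEMMAS AND PROOFS =====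

-- one Fibonacci-style step modulo m
def pvStep (m : Int) (p : Int × Int) : Int × Int := (p.2, PySem.Int.mod (p.1 + p.2) m)

lemma gen_fold (m : Int) (l : List Int) (acc : List (Int × Int)) (p : Int × Int) :
    (l.foldl
      (fun (st : List (Int × Int) × Int × Int) _ =>
        (st.1 ++ [st.2], st.2.2, PySem.Int.mod (st.2.1 + st.2.2) m))
      (acc, p)).1
    = acc ++ (List.range l.length).map (fun n => (pvStep m)^[n] p) := by
  induction l generalizing acc p with
  | nil => simp
  | cons hd tl ih =>
      simp only [List.foldl_cons, List.length_cons, List.range_succ_eq_map, List.map_cons,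
        List.map_map]
      rw [show ((acc, p).1 ++ [(acc, p).2], (acc, p).2.2,
            PySem.Int.mod ((acc, p).2.1 + (acc, p).2.2) m)
          = (acc ++ [p], pvStep m p) from rfl]
      rw [ih]
      simp [Function.comp_def, Function.iterate_succ_apply]

lemma genSeq_eq (sa sb m len : Int) :
    generate_sequence sa sb m len
    = (List.range len.toNat).map
        (fun n => (pvStep m)^[n] (PySem.Int.mod sa m, PySem.Int.mod sb m)) := by
  unfold generate_sequence
  rw [gen_fold]
  simp [PySem.List.length_pyRange_one]

lemma vcLoop_eq_all (m cx cy : Int) (N : Nat) (d c s : Int × Int) :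
    vcLoop m cx cy N d c s
    = (List.range N).all (fun n =>
        decide ((pvStep m)^[n] s
          = (PySem.Int.mod (cx * ((pvStep m)^[n] d).1 + cy * ((pvStep m)^[n] c).1) m,
             PySem.Int.mod (cx * ((pvStep m)^[n] d).2 + cy * ((pvStep m)^[n] c).2) m))) := by
  induction N generalizing d c s with
  | zero => simp [vcLoop]
  | succ k ih =>
      rw [List.range_succ_eq_map]
      simp only [List.all_cons, List.all_map]
      rw [vcLoop]
      rw [ih]
      by_cases h : PySem.Int.mod (cx * d.1 + cy * c.1) m ≠ s.1 ∨
                   PySem.Int.mod (cx * d.2 + cy * c.2) m ≠ s.2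
      · rw [if_pos h]
        have : ¬ (s = (PySem.Int.mod (cx * d.1 + cy * c.1) m,
                       PySem.Int.mod (cx * d.2 + cy * c.2) m)) := by
          rcases h with h | h <;> intro he <;> exact h (by rw [he])
        simp [this]
      · rw [if_neg h]
        simp only [not_or, ne_eq, not_not] at h
        have hs : s = (PySem.Int.mod (cx * d.1 + cy * c.1) m,
                       PySem.Int.mod (cx * d.2 + cy * c.2) m) :=
          Prod.ext_iff.mpr ⟨h.1.symm, h.2.symm⟩
        simp only [Function.iterate_zero, id_eq, hs, decide_true, Bool.true_and]
        exact List.all_congr rfl fun n => by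
          simp [Function.iterate_succ_apply, pvStep]

-- `all` respects pointwise equality on the list's members
lemma all_congr_mem {α : Type} (l : List α) (p q : α → Bool) (h : ∀ a ∈ l, p a = q a) :
    l.all p = l.all q := by
  induction l with
  | nil => rfl
  | cons x xs ih =>
      simp only [List.all_cons, h x (by simp), ih fun a ha => h a (by simp [ha])]

-- ===== VERDICT (by name: the statement is the Claim_ definition above) =====
theorem verify_coefficients_spec : Claim_equal_verify_coefficients := by
  intro m gen_a gen_b start_i start_j coeff_x coeff_y seq_length _ _
  unfold Spec_verify_coefficients verify_coefficients verify_coefficients_alt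
  rw [genSeq_eq, genSeq_eq, genSeq_eq, vcLoop_eq_all]
  rw [PySem.List.pyRange_one]
  simp only [Int.sub_zero, List.all_map]
  apply all_congr_mem
  intro n hn
  have hn' : n < seq_length.toNat := List.mem_range.mp hn
  simp [PySem.List.pyGet?_natCast, hn']
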